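-- pv_equiv track=rewrite | github.com/Alpha-778/CodeForces-solution-in-Python | 2152D Division Versus Addition.py | g_single
-- ===== SOURCE A (Python) =====
-- def g_single(x):
--     cnt = 0
--     while x > 1:
--         x //= 2
--         cnt += 1
--         if x == 1:
--             break
--         x += 1
--     return cnt
-- ===== SOURCE B (Python) =====
-- def g_single(x):
--     if x <= 1:
--         return 0
--     if x <= 3:
--         return 1
--     return (x - 2).bit_length()
-- ===== Notes on version B (the rewrite author's own statement) =====
-- stated objective: simpler
-- what changed: Replaced the halve-then-increment loop by a closed form: under the substitution y = x-2 each non-final step is a plain halving of y, so the answer is the bit length of x-2, with constant guards for the small cases.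
import Mathlib
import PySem

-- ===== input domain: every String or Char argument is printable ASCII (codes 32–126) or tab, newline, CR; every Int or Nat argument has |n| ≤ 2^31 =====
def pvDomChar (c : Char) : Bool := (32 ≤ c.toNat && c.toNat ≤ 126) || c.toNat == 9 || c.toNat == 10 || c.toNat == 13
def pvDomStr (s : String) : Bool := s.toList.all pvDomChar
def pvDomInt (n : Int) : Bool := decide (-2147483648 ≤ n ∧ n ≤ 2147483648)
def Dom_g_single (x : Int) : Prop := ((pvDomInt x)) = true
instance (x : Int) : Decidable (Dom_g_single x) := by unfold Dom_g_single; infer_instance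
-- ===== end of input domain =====

-- B replaces A's halve-then-increment loop by a closed form via (x-2).bit_length(); objective: simpler (no loop).

-- ===== PORT A =====
-- A's while-loop; fuel = x.toNat is a totality guard only (the loop variable strictly decreases by at least 1 per iteration while x > 1).
def g_singleLoop : Nat → Int → Int → Int
  | 0, _, cnt => cnt
  | fuel + 1, x, cnt =>
    if x > 1 then
      let x' := PySem.Int.floordiv x 2
      let cnt' := cnt + 1
      if x' = 1 then cnt'
      else g_singleLoop fuel (x' + 1) cnt'
    else cnt

def g_single (x : Int) : Int := g_singleLoop x.toNat x 0

-- ===== PORT B =====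
def g_single_alt (x : Int) : Int :=
  if x ≤ 1 then 0
  else if x ≤ 3 then 1
  else ((PySem.Int.bitLength (x - 2) : Nat) : Int)

-- ===== PRECONDITION & SPEC =====
def Spec_g_single (x : Int) (out : Int) : Prop := out = g_single_alt x
instance (x : Int) (out : Int) : Decidable (Spec_g_single x out) := by unfold Spec_g_single; infer_instance

-- ===== CLAIM (what is proved, stated in full; the proofs are below) =====
def Claim_equal_g_single : Prop := ∀ (x : Int), Dom_g_single x → Spec_g_single x (g_single x)

-- ===== LEMMAS AND PROOFS =====

-- One unfolding of B's closed form matches one iteration of A's loop for x ≥ 4.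
theorem g_single_alt_step (x : Int) (hx : 4 ≤ x) :
    g_single_alt x = g_single_alt (PySem.Int.floordiv x 2 + 1) + 1 := by
  rw [PySem.Int.floordiv_eq_ediv_of_pos (by omega : (0:Int) < 2)]
  by_cases h5 : x ≤ 5
  · interval_cases x <;> decide
  · have h2 : ¬ x ≤ 1 := by omega
    have h3 : ¬ x ≤ 3 := by omega
    have h2' : ¬ x / 2 + 1 ≤ 1 := by omega
    have h3' : ¬ x / 2 + 1 ≤ 3 := by omega
    simp only [g_single_alt, h2, h3, h2', h3', if_false]
    have hpos : (0:Int) < x - 2 := by omega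
    rw [PySem.Int.bitLength_of_pos hpos,
        PySem.Int.floordiv_eq_ediv_of_pos (by omega : (0:Int) < 2)]
    have : (x - 2) / 2 = x / 2 + 1 - 2 := by omega
    rw [this]
    push_cast
    ring

theorem g_singleLoop_eq : ∀ (n : Nat) (x cnt : Int), x.toNat ≤ n →
    g_singleLoop n x cnt = cnt + g_single_alt x := by
  intro n
  induction n with
  | zero =>
    intro x cnt h
    have h1 : x ≤ 1 := by omega
    simp [g_singleLoop, g_single_alt, h1]
  | succ n ih =>
    intro x cnt h
    by_cases h1 : x > 1
    · simp only [g_singleLoop, h1, if_true]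
      by_cases hb : PySem.Int.floordiv x 2 = 1
      · have hx23 : 2 ≤ x ∧ x ≤ 3 := by
          rw [PySem.Int.floordiv_eq_ediv_of_pos (by omega : (0:Int) < 2)] at hb
          omega
        simp only [hb, if_true]
        simp [g_single_alt, show ¬ x ≤ 1 by omega, show x ≤ 3 by omega]
      · have hx4 : 4 ≤ x := by
          rw [PySem.Int.floordiv_eq_ediv_of_pos (by omega : (0:Int) < 2)] at hb
          omega
        have hlt : (PySem.Int.floordiv x 2 + 1).toNat ≤ n := by
          rw [PySem.Int.floordiv_eq_ediv_of_pos (by omega : (0:Int) < 2)]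
          omega
        simp only [hb, if_false]
        rw [ih _ _ hlt, g_single_alt_step x hx4]
        ring
    · simp [g_singleLoop, h1, g_single_alt, show x ≤ 1 by omega]

-- ===== VERDICT (by name: the statement is the Claim_ definition above) =====
theorem g_single_spec : Claim_equal_g_single := by
  intro x _
  unfold Spec_g_single g_single
  rw [g_singleLoop_eq x.toNat x 0 le_rfl]
  ring
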